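-- pv_equiv track=rewrite | github.com/nqeron/advent_of_code_2019 | day_4/day_4_part_2.py | check_for_double
-- ===== SOURCE A (Python) =====
-- def check_for_double(stringed) -> bool:
--     s = 0
--     while s < len(stringed) - 1:
--         if stringed[s] == stringed[s+1]:
--             if len(stringed) > s+2 and stringed[s+2] == stringed[s]:
--                 s += 2
--                 continue
--             else:
--                 return True
--         s += 1
--     return False
-- ===== SOURCE B (Python) =====
-- from itertools import groupby
--
-- def check_for_double(stringed) -> bool:
--     return any(sum(1 for _ in g) % 2 == 0 for _, g in groupby(stringed))
-- ===== Notes on version B (the rewrite author's own statement) =====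
-- stated objective: idiomatic
-- what changed: Replaced the index-juggling while loop with skip-by-2 logic by grouping into maximal runs (itertools.groupby) and returning whether any run length is even.
import Mathlib
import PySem

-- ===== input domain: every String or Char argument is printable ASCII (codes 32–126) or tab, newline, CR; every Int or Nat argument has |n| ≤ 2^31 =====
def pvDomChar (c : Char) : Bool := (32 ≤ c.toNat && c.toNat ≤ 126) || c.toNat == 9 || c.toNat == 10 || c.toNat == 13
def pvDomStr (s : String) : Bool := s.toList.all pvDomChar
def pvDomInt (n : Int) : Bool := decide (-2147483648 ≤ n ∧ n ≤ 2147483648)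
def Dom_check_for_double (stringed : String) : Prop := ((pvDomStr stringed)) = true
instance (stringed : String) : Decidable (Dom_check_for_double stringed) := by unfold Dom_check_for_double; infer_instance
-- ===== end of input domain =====

-- B replaces A's index-juggling skip-by-2 while loop by grouping the string into
-- maximal runs and checking whether some run length is even (idiomatic, same cost).


-- ===== PORT A =====
-- while s < len-1: if s[s]==s[s+1]: (if len>s+2 and s[s+2]==s[s]: s+=2; continue else return True); s+=1
def checkLoopA (cs : List Char) (s : Nat) : Bool :=
  if h : s + 1 < cs.length then
    if cs[s]! == cs[s+1]! then
      if s + 2 < cs.length && (cs[s+2]! == cs[s]!) then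
        checkLoopA cs (s + 2)
      else true
    else checkLoopA cs (s + 1)
  else false
termination_by cs.length - s
decreasing_by all_goals omega

def check_for_double (stringed : String) : Bool := checkLoopA stringed.toList 0

-- ===== PORT B =====
-- lengths of the maximal runs of equal consecutive chars (itertools.groupby)
def runGo (c : Char) (n : Nat) : List Char → List Nat
  | [] => [n]
  | d :: rest => if d == c then runGo c (n + 1) rest else n :: runGo d 1 rest

def runLengths : List Char → List Nat
  | [] => []
  | c :: rest => runGo c 1 rest

def check_for_double_alt (stringed : String) : Bool :=
  (runLengths stringed.toList).any (fun n => n % 2 == 0)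

-- ===== PRECONDITION & SPEC =====
def Spec_check_for_double (stringed : String) (out : Bool) : Prop := out = check_for_double_alt stringed
instance (stringed : String) (out : Bool) : Decidable (Spec_check_for_double stringed out) := by unfold Spec_check_for_double; infer_instance

-- ===== CLAIM (what is proved, stated in full; the proofs are below) =====
def Claim_equal_check_for_double : Prop := ∀ (stringed : String), Dom_check_for_double stringed → Spec_check_for_double stringed (check_for_double stringed)

-- ===== LEMMAS AND PROOFS =====

-- list-shaped reading of A's loop (proof helper only)
def fA : List Char → Bool
  | a :: b :: rest =>
    if a == b then
      match rest with
      | c :: _ => if c == a then fA rest else true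
      | [] => true
    else fA (b :: rest)
  | _ => false

theorem checkLoopA_eq_fA (cs : List Char) (s : Nat) : checkLoopA cs s = fA (cs.drop s) := by
  fun_induction checkLoopA cs s with
  | case1 s h heq hcond ih =>
      have h2 : s + 2 < cs.length := by
        rcases Bool.and_eq_true_iff.mp hcond with ⟨h2, _⟩
        simpa using h2
      have hd : cs.drop s = cs[s] :: cs[s+1] :: cs[s+2] :: cs.drop (s+3) := by
        rw [List.drop_eq_getElem_cons (by omega), List.drop_eq_getElem_cons (by omega),
            List.drop_eq_getElem_cons (by omega)]
      have hd2 : cs.drop (s+2) = cs[s+2] :: cs.drop (s+3) := by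
        rw [List.drop_eq_getElem_cons (by omega)]
      rcases Bool.and_eq_true_iff.mp hcond with ⟨_, h3⟩
      simp only [List.getElem!_eq_getElem?_getD, List.getElem?_eq_getElem (show s < cs.length by omega),
        List.getElem?_eq_getElem (show s+1 < cs.length by omega),
        List.getElem?_eq_getElem h2, Option.getD_some] at heq h3
      rw [ih, hd, fA.eq_1, if_pos heq, if_pos h3, hd2]
  | case2 s h heq hcond =>
      have h1 : cs.drop s = cs[s] :: cs[s+1] :: cs.drop (s+2) := by
        rw [List.drop_eq_getElem_cons (by omega), List.drop_eq_getElem_cons (by omega)]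
      simp only [List.getElem!_eq_getElem?_getD, List.getElem?_eq_getElem (show s < cs.length by omega),
        List.getElem?_eq_getElem (show s+1 < cs.length by omega), Option.getD_some] at heq
      by_cases h2 : s + 2 < cs.length
      · have hd2 : cs.drop (s+2) = cs[s+2] :: cs.drop (s+3) := by
          rw [List.drop_eq_getElem_cons (by omega)]
        have h3 : ¬ (cs[s+2] == cs[s]) = true := by
          intro hcontra
          apply hcond
          simp only [List.getElem!_eq_getElem?_getD, List.getElem?_eq_getElem h2,
            List.getElem?_eq_getElem (show s < cs.length by omega), Option.getD_some]
          exact Bool.and_eq_true_iff.mpr ⟨by simpa using h2, hcontra⟩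
        rw [h1, hd2, fA.eq_1, if_pos heq, if_neg h3]
      · have hnil : cs.drop (s+2) = [] := List.drop_eq_nil_of_le (by omega)
        rw [h1, hnil, fA.eq_2, if_pos heq]
  | case3 s h heq ih =>
      have h1 : cs.drop s = cs[s] :: cs[s+1] :: cs.drop (s+2) := by
        rw [List.drop_eq_getElem_cons (by omega), List.drop_eq_getElem_cons (by omega)]
      have h1' : cs.drop (s+1) = cs[s+1] :: cs.drop (s+2) := by
        rw [List.drop_eq_getElem_cons (by omega)]
      simp only [List.getElem!_eq_getElem?_getD, List.getElem?_eq_getElem (show s < cs.length by omega),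
        List.getElem?_eq_getElem (show s+1 < cs.length by omega), Option.getD_some] at heq
      rcases hd2 : cs.drop (s+2) with _ | ⟨c, t⟩
      · rw [ih, h1', h1, hd2, fA.eq_2, if_neg heq]
      · rw [ih, h1', h1, hd2]
        conv_rhs => rw [fA.eq_1]
        rw [if_neg heq]
  | case4 s h =>
      rcases hd : cs.drop s with _ | ⟨a, _ | ⟨b, t⟩⟩
      · rfl
      · rfl
      · exfalso
        have hlen := congrArg List.length hd
        simp [List.length_drop] at hlen
        omega

-- parity of the leading run counter does not change the even-run test
theorem runGo_parity (l : List Char) (c : Char) (n : Nat) :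
    (runGo c (n + 2) l).any (fun m => m % 2 == 0) = (runGo c n l).any (fun m => m % 2 == 0) := by
  induction l generalizing c n with
  | nil => simp [runGo, Nat.add_mod_right]
  | cons d rest ih =>
      by_cases h : d = c
      · subst h
        simp only [runGo, BEq.rfl, if_pos]
        exact ih d (n + 1)
      · simp [runGo, h, Nat.add_mod_right]

theorem fA_eq_runs (l : List Char) :
    fA l = (runLengths l).any (fun m => m % 2 == 0) := by
  fun_induction fA l with
  | case1 a b hab c rest' hca ih =>
      have hab' : a = b := by simpa using hab
      have hca' : c = a := by simpa using hca
      rw [ih]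
      simp only [runLengths, ← hab', hca', runGo, BEq.rfl, if_true]
      exact (runGo_parity rest' _ 1).symm
  | case2 a b hab c rest' hca =>
      have hab' : a = b := by simpa using hab
      have hca' : ¬ c = a := by simpa using hca
      simp [runLengths, ← hab', runGo, hca']
  | case3 a b hab =>
      have hab' : a = b := by simpa using hab
      simp [runLengths, ← hab', runGo]
  | case4 a b rest hab ih =>
      have hba : ¬ b = a := by intro hh; exact hab (by simp [hh])
      rw [ih]
      simp [runLengths, runGo, hba]
  | case5 l hne =>
      rcases l with _ | ⟨a, _ | ⟨b, t⟩⟩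
      · rfl
      · simp [runLengths, runGo]
      · exact (hne a b t rfl).elim

-- ===== VERDICT (by name: the statement is the Claim_ definition above) =====
theorem check_for_double_spec : Claim_equal_check_for_double := by
  intro s _
  unfold Spec_check_for_double check_for_double check_for_double_alt
  rw [checkLoopA_eq_fA, List.drop_zero, fA_eq_runs]
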